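-- pv_equiv track=rewrite | github.com/laivii/TIRA-24 | Viikko 9/oddlist.py | valid_permutation
-- ===== SOURCE A (Python) =====
-- def valid_permutation( permutation, first_number ):
--     if permutation[ 0 ] != first_number:
--         return False
--
--     seen = set()
--     for i in range( len( permutation) - 1):
--         sum_pair = permutation[ i ] + permutation[ i + 1 ]
--
--         if sum_pair in seen:
--             return False
--
--         seen.add( sum_pair )
--
--     return True
-- ===== SOURCE B (Python) =====
-- def valid_permutation(permutation, first_number):
--     if permutation[0] != first_number:
--         return False
--     sums = sorted(x + y for x, y in zip(permutation, permutation[1:]))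
--     return all(a != b for a, b in zip(sums, sums[1:]))
-- ===== Notes on version B (the rewrite author's own statement) =====
-- stated objective: alternative
-- what changed: Replaces the index loop with an incremental seen-set and early return by building all consecutive pair sums with zip in one comprehension, sorting them, and checking that no two adjacent sorted sums are equal.
import Mathlib
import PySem

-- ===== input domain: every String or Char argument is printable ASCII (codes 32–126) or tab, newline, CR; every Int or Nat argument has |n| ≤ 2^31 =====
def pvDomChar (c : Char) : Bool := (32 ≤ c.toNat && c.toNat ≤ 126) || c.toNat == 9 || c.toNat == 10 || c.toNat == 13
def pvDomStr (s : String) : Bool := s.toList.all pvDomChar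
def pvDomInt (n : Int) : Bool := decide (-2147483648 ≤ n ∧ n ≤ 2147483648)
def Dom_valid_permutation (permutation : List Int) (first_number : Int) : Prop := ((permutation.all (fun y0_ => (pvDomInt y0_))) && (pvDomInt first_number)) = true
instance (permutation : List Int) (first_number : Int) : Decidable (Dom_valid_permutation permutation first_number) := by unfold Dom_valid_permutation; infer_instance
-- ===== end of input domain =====

-- B replaces A's index loop with an incremental seen-set by a zip comprehension of the
-- pair sums followed by sort-then-adjacent-scan duplicate detection (alternative algorithm).

-- ===== PORT A =====
-- the loop: for i in range(len(permutation)-1), with the running set `seen`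
def validGoA (perm : List Int) : List Int → PySem.Set Int → Bool
  | [], _ => true
  | i :: rest, seen =>
    let sum_pair := PySem.List.pyGetD perm i 0 + PySem.List.pyGetD perm (i + 1) 0
    if sum_pair ∈ seen then false
    else validGoA perm rest (PySem.Set.add seen sum_pair)

def valid_permutation (permutation : List Int) (first_number : Int) : Bool :=
  -- permutation[0]: IndexError on the empty list is excluded by Pre_; the none branch is dead there
  match PySem.List.pyGet? permutation 0 with
  | none => false
  | some p0 =>
    if p0 ≠ first_number then false
    else validGoA permutation (PySem.List.pyRange 0 ((permutation.length : Int) - 1) 1) PySem.Set.empty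

-- ===== PORT B =====
def valid_permutation_alt (permutation : List Int) (first_number : Int) : Bool :=
  match PySem.List.pyGet? permutation 0 with
  | none => false
  | some p0 =>
    if p0 ≠ first_number then false
    else
      let sums := PySem.List.sorted ((permutation.zip permutation.tail).map (fun xy => xy.1 + xy.2)) (fun x => x) false
      (sums.zip sums.tail).all (fun ab => !(ab.1 == ab.2))

-- ===== PRECONDITION & SPEC =====
-- Pre_ excludes only the empty list, on which A raises IndexError at permutation[0] (B raises there too).
def Pre_valid_permutation (permutation : List Int) (_first_number : Int) : Prop := permutation ≠ []
instance (permutation : List Int) (first_number : Int) : Decidable (Pre_valid_permutation permutation first_number) := by unfold Pre_valid_permutation; infer_instance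
def pvWitness_valid_permutation : List Int × Int := ([1, 2, 3], 1)

def Spec_valid_permutation (permutation : List Int) (first_number : Int) (out : Bool) : Prop := out = valid_permutation_alt permutation first_number
instance (permutation : List Int) (first_number : Int) (out : Bool) : Decidable (Spec_valid_permutation permutation first_number out) := by unfold Spec_valid_permutation; infer_instance

-- ===== CLAIM (what is proved, stated in full; the proofs are below) =====
def Claim_equal_valid_permutation : Prop := ∀ (permutation : List Int) (first_number : Int), Dom_valid_permutation permutation first_number → Pre_valid_permutation permutation first_number → Spec_valid_permutation permutation first_number (valid_permutation permutation first_number)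

-- ===== LEMMAS AND PROOFS =====

-- the list of consecutive pair sums, as B builds it
def pairSums (perm : List Int) : List Int := (perm.zip perm.tail).map (fun xy => xy.1 + xy.2)

-- A's loop succeeds iff the sums of the remaining indices are pairwise distinct and fresh w.r.t. `seen`
theorem validGoA_iff (perm : List Int) (is : List Int) (seen : PySem.Set Int) :
    validGoA perm is seen = true ↔
      ((is.map (fun i => PySem.List.pyGetD perm i 0 + PySem.List.pyGetD perm (i + 1) 0)).Nodup ∧
       ∀ s ∈ is.map (fun i => PySem.List.pyGetD perm i 0 + PySem.List.pyGetD perm (i + 1) 0), s ∉ seen) := by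
  induction is generalizing seen with
  | nil => simp [validGoA]
  | cons i rest ih =>
    simp only [validGoA, List.map_cons, List.nodup_cons, List.mem_cons]
    split
    next h =>
      simp only [Bool.false_eq_true, false_iff, not_and]
      intro _ h2
      exact absurd h (h2 _ (Or.inl rfl))
    next h =>
      rw [ih]
      simp only [PySem.Set.mem_add, not_or]
      constructor
      · rintro ⟨hnd, hfresh⟩
        exact ⟨⟨fun hm => (hfresh _ hm).2 rfl, hnd⟩,
               fun s hs => hs.elim (fun e => e ▸ h) (fun hm => (hfresh s hm).1)⟩
      · rintro ⟨⟨hni, hnd⟩, hfresh⟩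
        exact ⟨hnd, fun s hs => ⟨hfresh s (Or.inr hs), fun e => hni (e ▸ hs)⟩⟩

-- the indexed sums A computes are exactly B's zip comprehension
theorem map_range_eq_pairSums (perm : List Int) :
    (PySem.List.pyRange 0 ((perm.length : Int) - 1) 1).map
        (fun i => PySem.List.pyGetD perm i 0 + PySem.List.pyGetD perm (i + 1) 0)
      = pairSums perm := by
  apply List.ext_getElem
  · simp [pairSums, PySem.List.length_pyRange_one]
  · intro i h1 h2
    have hlen : i + 1 < perm.length := by
      simp only [pairSums, List.length_map, List.length_zip, List.length_tail] at h2
      omega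
    simp only [pairSums, List.getElem_map, PySem.List.getElem_pyRange_one, zero_add,
      List.getElem_zip, List.getElem_tail]
    have e1 : PySem.List.pyGetD perm (i : Int) 0 = perm[i] := by
      rw [PySem.List.pyGetD_natCast]
      exact List.getD_eq_getElem _ _ (by omega)
    have e2 : PySem.List.pyGetD perm ((i : Int) + 1) 0 = perm[i + 1] := by
      have hcast : ((i : Int) + 1) = ((i + 1 : Nat) : Int) := by push_cast; ring
      rw [hcast, PySem.List.pyGetD_natCast]
      exact List.getD_eq_getElem _ _ hlen
    rw [e1, e2]

-- zip-with-tail all-distinct test = IsChain (≠)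
theorem all_zip_tail_iff_chain (l : List Int) :
    ((l.zip l.tail).all (fun ab => !(ab.1 == ab.2)) = true) ↔ l.IsChain (· ≠ ·) := by
  match l with
  | [] => simp
  | [a] => simp
  | a :: b :: t =>
    simp only [List.tail_cons, List.zip_cons_cons, List.all_cons, Bool.and_eq_true,
      List.isChain_cons_cons, ne_eq]
    rw [← all_zip_tail_iff_chain (b :: t)]
    simp

-- a ≤-chain with no equal neighbours is a <-chain
theorem isChain_lt_of_le_ne : ∀ l : List Int, l.Pairwise (· ≤ ·) → l.IsChain (· ≠ ·) →
    l.IsChain (· < ·)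
  | [], _, _ => List.isChain_nil
  | [a], _, _ => List.isChain_singleton a
  | a :: b :: t, h, hc => by
    rcases List.pairwise_cons.mp h with ⟨hab, htail⟩
    rcases List.isChain_cons_cons.mp hc with ⟨hne, hct⟩
    exact List.isChain_cons_cons.mpr
      ⟨lt_of_le_of_ne (hab b (List.mem_cons_self)) hne, isChain_lt_of_le_ne _ htail hct⟩

-- on a ≤-sorted list, no equal neighbours ↔ no duplicates at all
theorem chain_ne_iff_nodup (l : List Int) (h : l.Pairwise (· ≤ ·)) :
    l.IsChain (· ≠ ·) ↔ l.Nodup := by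
  constructor
  · intro hc
    exact (List.isChain_iff_pairwise.mp (isChain_lt_of_le_ne l h hc)).imp ne_of_lt
  · intro hn
    exact List.Pairwise.isChain hn

-- ===== VERDICT (by name: the statement is the Claim_ definition above) =====
theorem valid_permutation_spec : Claim_equal_valid_permutation := by
  intro perm fn _hdom _hpre
  unfold Spec_valid_permutation valid_permutation valid_permutation_alt
  cases h0 : PySem.List.pyGet? perm 0 with
  | none => rfl
  | some p0 =>
    simp only
    by_cases hg : p0 ≠ fn
    · simp [hg]
    · simp only [if_neg hg]
      rw [Bool.eq_iff_iff]
      rw [validGoA_iff, map_range_eq_pairSums, all_zip_tail_iff_chain]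
      rw [chain_ne_iff_nodup _ (PySem.List.sorted_pairwise _ _)]
      rw [List.Perm.nodup_iff (PySem.List.sorted_perm _ _ _)]
      simp [PySem.Set.empty, pairSums]
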